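-- pv_equiv track=rewrite | github.com/lmdu/macaca | macaca/jinja2.py | format_codon
-- ===== SOURCE A (Python) =====
-- def format_codon(codon, pos):
-- 	pos -= 1
-- 	bs = []
-- 	for i, b in enumerate(codon):
-- 		if i == pos:
-- 			bs.append(r'<span style="color:red;">%s</span>' % b)
-- 		else:
-- 			bs.append(b)
-- 	return "".join(bs)
-- ===== SOURCE B (Python) =====
-- def format_codon(codon, pos):
-- 	idx = pos - 1
-- 	if 0 <= idx < len(codon):
-- 		return codon[:idx] + '<span style="color:red;">%s</span>' % codon[idx] + codon[idx+1:]
-- 	return codon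
-- ===== Notes on version B (the rewrite author's own statement) =====
-- stated objective: simpler
-- what changed: Replaces the per-character enumerate loop that rebuilds the whole string piece by piece with a bounds check plus two slices around the one wrapped character.
import Mathlib
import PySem

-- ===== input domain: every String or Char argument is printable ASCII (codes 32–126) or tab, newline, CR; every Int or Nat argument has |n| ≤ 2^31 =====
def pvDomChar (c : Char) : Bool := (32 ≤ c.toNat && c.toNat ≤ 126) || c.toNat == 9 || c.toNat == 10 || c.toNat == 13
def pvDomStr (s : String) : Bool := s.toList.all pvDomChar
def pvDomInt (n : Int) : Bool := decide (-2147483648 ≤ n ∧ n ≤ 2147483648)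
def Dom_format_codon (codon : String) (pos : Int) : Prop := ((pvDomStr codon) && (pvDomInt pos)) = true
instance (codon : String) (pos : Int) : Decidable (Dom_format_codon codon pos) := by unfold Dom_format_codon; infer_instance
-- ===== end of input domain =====

-- B replaces A's per-character enumerate loop with a bounds check and two slices around the one wrapped character (objective: simpler).

-- ===== PORT A =====
-- '<span style="color:red;">%s</span>' % b, as a list of chars (the %-format splices the one char)
def pvWrap (b : Char) : List Char :=
  "<span style=\"color:red;\">".toList ++ [b] ++ "</span>".toList

-- literal port of A: pos -= 1; for i, b in enumerate(codon): append wrapped/plain; "".join(bs)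
-- (bs is kept as the flat char list the joined string is made of — exact for "".join of these pieces)
def format_codon (codon : String) (pos : Int) : String :=
  String.ofList
    ((PySem.List.enumerate codon.toList 0).foldl
      (fun acc ib => acc ++ (if ib.1 = pos - 1 then pvWrap ib.2 else [ib.2])) [])

-- ===== PORT B =====
-- idx = pos - 1; if 0 <= idx < len(codon): codon[:idx] + wrapped codon[idx] + codon[idx+1:]; else codon
def format_codon_alt (codon : String) (pos : Int) : String :=
  if 0 ≤ pos - 1 ∧ pos - 1 < (codon.toList.length : Int) then
    String.ofList
      (PySem.List.slice codon.toList none (some (pos - 1)) ++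
       pvWrap ((PySem.List.pyGet? codon.toList (pos - 1)).getD ' ') ++  -- codon[idx]; in range by the guard
       PySem.List.slice codon.toList (some (pos - 1 + 1)) none)
  else codon

-- ===== PRECONDITION & SPEC =====
def Spec_format_codon (codon : String) (pos : Int) (out : String) : Prop := out = format_codon_alt codon pos
instance (codon : String) (pos : Int) (out : String) : Decidable (Spec_format_codon codon pos out) := by unfold Spec_format_codon; infer_instance

-- ===== CLAIM (what is proved, stated in full; the proofs are below) =====
def Claim_equal_format_codon : Prop := ∀ (codon : String) (pos : Int), Dom_format_codon codon pos → Spec_format_codon codon pos (format_codon codon pos)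

-- ===== LEMMAS AND PROOFS =====

-- A's loop, flattened: marks position p while scanning from index s
lemma pv_flat (cs : List Char) (p : Int) : ∀ s : Int,
    (PySem.List.enumerate cs s).flatMap (fun ib => if ib.1 = p then pvWrap ib.2 else [ib.2]) =
    if s ≤ p ∧ p < s + cs.length then
      cs.take (p - s).toNat ++ pvWrap (cs.getD (p - s).toNat ' ') ++ cs.drop ((p - s).toNat + 1)
    else cs := by
  induction cs with
  | nil =>
    intro s
    simp only [PySem.List.enumerate_nil, List.flatMap_nil, List.length_nil, Nat.cast_zero]
    rw [if_neg (by omega)]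
  | cons c cs ih =>
    intro s
    rw [PySem.List.enumerate_cons, List.flatMap_cons, ih (s + 1)]
    by_cases hsp : s = p
    · subst hsp
      rw [if_pos rfl, if_neg (by simp), if_pos (by simp)]
      simp
    · rw [if_neg (by exact_mod_cast hsp)]
      by_cases h : s + 1 ≤ p ∧ p < s + 1 + (cs.length : Int)
      · rw [if_pos h, if_pos (by simp at h ⊢; omega)]
        have ht : (p - s).toNat = (p - (s + 1)).toNat + 1 := by omega
        rw [ht]
        simp
      · rw [if_neg h, if_neg (by simp at h ⊢; omega)]
        simp

-- B's slices / indexing, rewritten to take/drop/getD (0 ≤ idx, idx < len)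
lemma pv_b_inrange (cs : List Char) (idx : Int) (h0 : 0 ≤ idx) (h1 : idx < (cs.length : Int)) :
    PySem.List.slice cs none (some idx) = cs.take idx.toNat ∧
    (PySem.List.pyGet? cs idx).getD ' ' = cs.getD idx.toNat ' ' ∧
    PySem.List.slice cs (some (idx + 1)) none = cs.drop (idx.toNat + 1) := by
  refine ⟨PySem.List.slice_to cs h0, ?_, ?_⟩
  · simp [PySem.List.pyGet?, PySem.List.pyIdx?, h0, h1, List.getD]
  · rw [PySem.List.slice_from cs (by omega : (0:Int) ≤ idx + 1)]
    congr 1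
    omega

-- ===== VERDICT (by name: the statement is the Claim_ definition above) =====
theorem format_codon_spec : Claim_equal_format_codon := by
  intro codon pos _
  unfold Spec_format_codon format_codon format_codon_alt
  rw [PySem.List.foldl_append_eq_flatMap
        (fun ib : Int × Char => if ib.1 = pos - 1 then pvWrap ib.2 else [ib.2])
        (PySem.List.enumerate codon.toList 0) []]
  rw [List.nil_append, pv_flat codon.toList (pos - 1) 0]
  by_cases h : 0 ≤ pos - 1 ∧ pos - 1 < (codon.toList.length : Int)
  · obtain ⟨h1, h2, h3⟩ := pv_b_inrange codon.toList (pos - 1) h.1 h.2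
    rw [if_pos (by omega : (0:Int) ≤ pos - 1 ∧ pos - 1 < 0 + (codon.toList.length : Int)), if_pos h, h1, h2, h3]
    simp
  · rw [if_neg (by omega : ¬((0:Int) ≤ pos - 1 ∧ pos - 1 < 0 + (codon.toList.length : Int))), if_neg h]
    exact String.ofList_toList
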